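-- pv_equiv track=rewrite | github.com/YUBIN-githubb/CodingTest | 프로그래머스/1/1845. 폰켓몬/폰켓몬.py | solution
-- ===== SOURCE A (Python) =====
-- def solution(nums):
--     num = []
--     for i in range (0,len(nums)):
--         if nums[i] not in num:
--             num.append(nums[i])
--     if len(nums) // 2 < len(num):
--         return len(nums) // 2
--     elif len(nums) // 2 > len(num):
--         return len(num)
--     else:
--         return len(num)
-- ===== SOURCE B (Python) =====
-- def solution(nums):
--     s = sorted(nums)
--     if not s:
--         distinct = 0
--     else:
--         distinct = 1
--         for a, b in zip(s, s[1:]):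
--             if a != b:
--                 distinct += 1
--     return min(len(nums) // 2, distinct)
-- ===== Notes on version B (the rewrite author's own statement) =====
-- stated objective: faster
-- what changed: B counts distinct values by sorting once and counting adjacent changes in a single pass (and returns min directly), instead of A's quadratic repeated membership scan over a growing list.
import Mathlib
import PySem

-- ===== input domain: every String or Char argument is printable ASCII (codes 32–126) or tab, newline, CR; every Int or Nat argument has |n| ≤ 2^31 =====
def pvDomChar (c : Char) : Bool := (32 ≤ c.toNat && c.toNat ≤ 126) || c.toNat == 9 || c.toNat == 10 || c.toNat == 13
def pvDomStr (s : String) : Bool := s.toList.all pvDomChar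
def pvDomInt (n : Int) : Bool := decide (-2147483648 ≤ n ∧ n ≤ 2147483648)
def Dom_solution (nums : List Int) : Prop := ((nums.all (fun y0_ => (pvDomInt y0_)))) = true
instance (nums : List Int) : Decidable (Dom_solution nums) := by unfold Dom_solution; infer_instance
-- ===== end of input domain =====

-- B replaces A's quadratic membership-scan distinct count by sort + one adjacent-change pass (faster).

-- ===== PORT A =====
-- index loop 'for i in range(0, len(nums))'; pyGetD's default is never read (i is always in range)
def solution (nums : List Int) : Int :=
  let num := (PySem.List.pyRange 0 (nums.length : Int) 1).foldl
    (fun acc i =>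
      if PySem.List.pyGetD nums i 0 ∈ acc then acc
      else acc ++ [PySem.List.pyGetD nums i 0]) ([] : List Int)
  if PySem.Int.floordiv (nums.length : Int) 2 < (num.length : Int) then
    PySem.Int.floordiv (nums.length : Int) 2
  else if (num.length : Int) < PySem.Int.floordiv (nums.length : Int) 2 then
    (num.length : Int)
  else
    (num.length : Int)

-- ===== PORT B =====
def solution_alt (nums : List Int) : Int :=
  let s := PySem.List.sorted nums (fun x => x) false
  let distinct : Int :=
    match s with
    | [] => 0
    | _ :: _ =>
      (s.zip (PySem.List.slice s (some 1) none)).foldl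
        (fun acc p => if p.1 ≠ p.2 then acc + 1 else acc) 1
  min (PySem.Int.floordiv (nums.length : Int) 2) distinct

-- ===== PRECONDITION & SPEC =====
def Spec_solution (nums : List Int) (out : Int) : Prop := out = solution_alt nums
instance (nums : List Int) (out : Int) : Decidable (Spec_solution nums out) := by unfold Spec_solution; infer_instance

-- ===== CLAIM (what is proved, stated in full; the proofs are below) =====
def Claim_equal_solution : Prop := ∀ (nums : List Int), Dom_solution nums → Spec_solution nums (solution nums)

-- ===== LEMMAS AND PROOFS =====

-- A's accumulator: stays nodup and collects exactly the set of seen elements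
theorem pv_foldl_dedup (l : List Int) : ∀ acc : List Int, acc.Nodup →
    (l.foldl (fun a x => if x ∈ a then a else a ++ [x]) acc).Nodup ∧
    (l.foldl (fun a x => if x ∈ a then a else a ++ [x]) acc).toFinset = acc.toFinset ∪ l.toFinset := by
  induction l with
  | nil => intro acc h; simpa using h
  | cons x xs ih =>
    intro acc h
    simp only [List.foldl_cons]
    by_cases hx : x ∈ acc
    · simp only [if_pos hx]
      obtain ⟨h1, h2⟩ := ih acc h
      have hx' : x ∈ acc.toFinset := by simpa using hx
      refine ⟨h1, ?_⟩
      rw [h2, List.toFinset_cons, Finset.union_insert,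
        Finset.insert_eq_self.mpr (Finset.mem_union_left _ hx')]
    · simp only [if_neg hx]
      have hnd : (acc ++ [x]).Nodup := by
        simp only [List.nodup_append, List.nodup_cons, List.not_mem_nil, not_false_eq_true,
          List.nodup_nil, and_true, true_and]
        refine ⟨h, ?_⟩
        intro a ha b hb heq
        exact hx ((List.mem_singleton.mp hb ▸ heq) ▸ ha)
      obtain ⟨h1, h2⟩ := ih (acc ++ [x]) hnd
      refine ⟨h1, ?_⟩
      rw [h2, List.toFinset_append, List.toFinset_cons, Finset.insert_eq]
      simp

-- B's scan: on a ≤-sorted nonempty list, adjacent changes + 1 = number of distinct values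
theorem pv_pairCount (xs : List Int) : ∀ x : Int, (x :: xs).Pairwise (· ≤ ·) →
    ((x :: xs).zip xs).countP (fun p => p.1 ≠ p.2) + 1 = (x :: xs).toFinset.card := by
  induction xs with
  | nil => intro x _; simp
  | cons y t ih =>
    intro x hp
    obtain ⟨hall, hp'⟩ := List.pairwise_cons.mp hp
    have hxy : x ≤ y := hall y (by simp)
    have hIH := ih y hp'
    by_cases hxyeq : x = y
    · subst hxyeq
      rw [List.zip_cons_cons, List.countP_cons]
      simpa using hIH
    · have hxnot : x ∉ (y :: t).toFinset := by
        simp only [List.toFinset_cons, Finset.mem_insert, List.mem_toFinset]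
        rintro (h | h)
        · exact hxyeq h
        · exact hxyeq (le_antisymm hxy (List.rel_of_pairwise_cons hp' h))
      rw [List.zip_cons_cons, List.countP_cons, List.toFinset_cons,
        Finset.card_insert_of_notMem hxnot]
      simp only [ne_eq, hxyeq] at hIH ⊢
      simp only [not_false_eq_true, decide_true, if_true]
      omega

-- ===== VERDICT (by name: the statement is the Claim_ definition above) =====
theorem solution_spec : Claim_equal_solution := by
  intro nums _
  unfold Spec_solution solution solution_alt
  dsimp only
  rw [PySem.List.foldl_pyRange_zero_pyGetD' nums 0
        (fun a x => if x ∈ a then a else a ++ [x]) []]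
  obtain ⟨hnd, hset⟩ := pv_foldl_dedup nums [] List.nodup_nil
  set num := nums.foldl (fun a x => if x ∈ a then a else a ++ [x]) [] with hnum
  have hlenA : num.length = nums.toFinset.card := by
    rw [← List.toFinset_card_of_nodup hnd, hset]; simp
  set s := PySem.List.sorted nums (fun x => x) false with hs
  have hperm : s.Perm nums := PySem.List.sorted_perm nums (fun x => x) false
  have hsfin : s.toFinset = nums.toFinset := List.toFinset_eq_of_perm s nums hperm
  rw [PySem.List.slice_from_one, hlenA]
  clear_value num s
  clear hnum hlenA hnd hset
  cases s with
  | nil =>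
    have hn : nums = [] := Eq.symm (List.Perm.nil_eq hperm)
    subst hn
    simp [PySem.Int.floordiv]
  | cons x xs =>
    have hpw : (x :: xs).Pairwise (· ≤ ·) := by
      have hsp := PySem.List.sorted_pairwise nums (fun x => x)
      rw [← hs] at hsp
      simpa using hsp
    have hcnt := pv_pairCount xs x hpw
    rw [hsfin] at hcnt
    simp only [List.tail_cons]
    rw [PySem.List.foldl_ite_add_one]
    have hcast : (1 : Int) + (((x :: xs).zip xs).countP (fun p => p.1 ≠ p.2) : Int)
        = (nums.toFinset.card : Int) := by
      rw [← hcnt]; push_cast; ring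
    rw [hcast]
    rcases lt_trichotomy (PySem.Int.floordiv (nums.length : Int) 2) ((nums.toFinset.card : Int)) with h | h | h
    · rw [if_pos h, min_eq_left h.le]
    · rw [if_neg (by omega), if_neg (by omega), min_eq_right h.ge]
    · rw [if_neg (by omega), if_pos h, min_eq_right h.le]
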